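-- pv_equiv track=rewrite | github.com/Yawkata/nekvorepo | services/repo-service/app/api/v1/endpoints/rebase.py | _find_collision_roots
-- ===== SOURCE A (Python) =====
-- def _find_collision_roots(type_collision_paths: set[str]) -> set[str]:
--     """
--     A collision root is a type_collision path P where no shorter type_collision
--     path is a strict prefix of P.
--
--     Example: for {"lib", "lib/core.py"}, "lib" is the root because "lib" is a
--     strict prefix of "lib/core.py" but no type_collision path is a prefix of "lib".
--     """
--     roots: set[str] = set()
--     for path in type_collision_paths:
--         parts = path.split("/")
--         is_root = True
--         for i in range(1, len(parts)):
--             if "/".join(parts[:i]) in type_collision_paths: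
--                 is_root = False
--                 break
--         if is_root:
--             roots.add(path)
--     return roots
-- ===== SOURCE B (Python) =====
-- def _find_collision_roots(type_collision_paths):
--     # Trie-style grouping by path components: one pass builds component groups,
--     # recursion marks every path that has a strict prefix-path ("covered");
--     # roots are the uncovered paths.
--     items = [(p, p.split("/")) for p in type_collision_paths]
--     covered = _covered(items)
--     return {p for p in type_collision_paths if p not in covered}
--
--
-- def _covered(items):
--     """items: (original path, remaining components); component lists non-empty.
--     Returns the set of originals having a strict prefix-path among the items."""
--     ended = {ps[0] for _, ps in items if len(ps) == 1}
--     grouped = [(ps[0], (o, ps[1:])) for o, ps in items if len(ps) > 1]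
--     groups = {}
--     for head, it in grouped:
--         groups.setdefault(head, []).append(it)
--     covered = set()
--     for head, sub in groups.items():
--         if head in ended:
--             covered.update(o for o, _ in sub)
--         else:
--             covered |= _covered(sub)
--     return covered
-- ===== Notes on version B (the rewrite author's own statement) =====
-- stated objective: alternative
-- what changed: A tests, for every path, each of its joined '/'-prefixes against the whole set; B builds the prefix structure once by recursively grouping the split paths by leading component (a component trie), marks every path below a group whose component itself is a path as covered, and returns the uncovered paths.
import Mathlib
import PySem

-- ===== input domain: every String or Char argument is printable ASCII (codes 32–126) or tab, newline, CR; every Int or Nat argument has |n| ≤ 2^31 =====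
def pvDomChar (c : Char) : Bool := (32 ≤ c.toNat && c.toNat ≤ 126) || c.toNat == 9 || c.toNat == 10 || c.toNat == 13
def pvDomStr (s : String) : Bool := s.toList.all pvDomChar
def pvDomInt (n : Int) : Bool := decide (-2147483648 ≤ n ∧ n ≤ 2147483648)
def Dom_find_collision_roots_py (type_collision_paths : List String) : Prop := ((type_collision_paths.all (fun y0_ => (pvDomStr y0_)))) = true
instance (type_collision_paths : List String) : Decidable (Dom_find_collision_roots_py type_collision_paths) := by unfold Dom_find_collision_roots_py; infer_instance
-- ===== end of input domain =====

-- B replaces A's per-path scan over all joined "/"-prefixes by a one-pass trie-style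
-- grouping of the paths by components; the equivalence proved is about the RETURN value
-- (both Pythons return a set; both ports list the roots in input order).

-- shared primitive wrapper: Python's p.split("/") (total: the separator is nonempty)
def pvSplit (s : String) : List String := (PySem.Str.split? s "/").getD []

-- ===== PORT A =====
def find_collision_roots_py (type_collision_paths : List String) : List String :=
  type_collision_paths.foldl (fun roots path =>
    let parts := pvSplit path
    -- for i in range(1, len(parts)): if "/".join(parts[:i]) in type_collision_paths: is_root = False; break
    let is_root := (PySem.List.pyRange 1 (PySem.List.len parts)).all
      (fun i => !(PySem.Set.contains type_collision_paths
                    (PySem.Str.join "/" (PySem.List.slice parts none (some i)))))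
    if is_root then PySem.Set.add roots path else roots) []

-- ===== PORT B =====
-- _covered(items): one level of the component trie, recursing into unmarked groups
-- (the fuel argument only makes the recursion structural; B's top call passes enough)
def fcrCovered : Nat → List (String × List String) → PySem.Set String
  | 0, _ => []
  | fuel+1, items =>
    let ended : PySem.Set String :=
      PySem.Set.ofList ((items.filter (fun x => x.2.length == 1)).map (fun x => x.2.headD ""))
    let grouped := (items.filter (fun x => 1 < x.2.length)).map
      (fun x => (x.2.headD "", (x.1, x.2.drop 1)))
    let groups : PySem.Dict String (List (String × List String)) :=
      grouped.foldl (fun d p => d.modify p.1 [] (fun v => v ++ [p.2])) PySem.Dict.empty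
    groups.items.foldl (fun cov hs =>
      if PySem.Set.contains ended hs.1 then
        hs.2.foldl (fun c y => PySem.Set.add c y.1) cov
      else
        PySem.Set.union cov (fcrCovered fuel hs.2)) []

def find_collision_roots_py_alt (type_collision_paths : List String) : List String :=
  let items := type_collision_paths.map (fun p => (p, pvSplit p))
  let covered := fcrCovered ((items.map (fun x => x.2.length)).sum + 1) items
  type_collision_paths.foldl (fun s p =>
    if PySem.Set.contains covered p then s else PySem.Set.add s p) []

-- ===== PRECONDITION & SPEC =====
def Spec_find_collision_roots_py (type_collision_paths : List String) (out : List String) : Prop := out = find_collision_roots_py_alt type_collision_paths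
instance (type_collision_paths : List String) (out : List String) : Decidable (Spec_find_collision_roots_py type_collision_paths out) := by unfold Spec_find_collision_roots_py; infer_instance

-- ===== CLAIM (what is proved, stated in full; the proofs are below) =====
def Claim_equal_find_collision_roots_py : Prop := ∀ (type_collision_paths : List String), Dom_find_collision_roots_py type_collision_paths → Spec_find_collision_roots_py type_collision_paths (find_collision_roots_py type_collision_paths)

-- ===== LEMMAS AND PROOFS =====

theorem pvModifyHead_triv (l : List (List Char)) : List.modifyHead (fun x => x) l = l := by
  cases l <;> simp [List.modifyHead]

theorem pvSplitOn_go_eq (fuel : Nat) (l cur : List Char) (acc : List (List Char)) (h : l.length ≤ fuel) :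
    PySem.Chars.splitOn.go ['/'] fuel l cur acc
      = acc.reverse ++ (l.splitOn '/').modifyHead (cur.reverse ++ ·) := by
  induction fuel generalizing l cur acc with
  | zero =>
    have : l = [] := List.eq_nil_of_length_eq_zero (Nat.le_zero.mp h)
    subst this
    simp [PySem.Chars.splitOn.go, List.splitOn, List.splitOnP, List.splitOnP.go, List.modifyHead]
  | succ fuel ih =>
    cases l with
    | nil => simp [PySem.Chars.splitOn.go, List.splitOn, List.splitOnP, List.splitOnP.go, List.modifyHead]
    | cons c rest =>
      by_cases hc : c = '/'
      · subst hc
        rw [show PySem.Chars.splitOn.go ['/'] (fuel+1) ('/' :: rest) cur acc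
              = PySem.Chars.splitOn.go ['/'] fuel rest [] (cur.reverse :: acc) from by
            simp [PySem.Chars.splitOn.go, List.isPrefixOf]]
        rw [ih rest [] _ (by simpa using Nat.le_of_succ_le_succ (by simpa using h))]
        simp [List.splitOn, List.splitOnP_cons, pvModifyHead_triv]
      · have hpre : (['/'].isPrefixOf (c :: rest)) = false := by
          simp [List.isPrefixOf]; exact fun h => hc h.symm
        rw [show PySem.Chars.splitOn.go ['/'] (fuel+1) (c :: rest) cur acc
              = PySem.Chars.splitOn.go ['/'] fuel rest (c :: cur) acc from by
            simp [PySem.Chars.splitOn.go, hpre]]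
        rw [ih rest (c :: cur) acc (by simpa using Nat.le_of_succ_le_succ (by simpa using h))]
        simp only [List.splitOn, List.splitOnP_cons, beq_iff_eq, hc, if_false]
        have hne := List.splitOnP_ne_nil (fun a => a == '/') rest
        cases hsp : List.splitOnP (fun a => a == '/') rest with
        | nil => exact absurd hsp hne
        | cons hd tl => simp [List.modifyHead]

theorem pvSplitOn_eq (cs : List Char) :
    PySem.Chars.splitOn cs ['/'] = cs.splitOn '/' := by
  rw [PySem.Chars.splitOn, pvSplitOn_go_eq _ _ _ _ (by omega)]
  simp [pvModifyHead_triv]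

theorem pvSplit_eq (s : String) :
    pvSplit s = (s.toList.splitOn '/').map String.ofList := by
  rw [pvSplit]
  simp [PySem.Str.split?, PySem.Chars.split?, pvSplitOn_eq]

theorem pvSplitOnP_no_sep (p : Char → Bool) (cs : List Char) :
    ∀ piece ∈ cs.splitOnP p, ∀ a ∈ piece, p a = false := by
  induction cs with
  | nil => intro piece hp a ha; simp [List.splitOnP, List.splitOnP.go] at hp; subst hp; simp at ha
  | cons c rest ih =>
    intro piece hp a ha
    rw [List.splitOnP_cons] at hp
    by_cases hc : p c
    · simp [hc] at hp
      rcases hp with hp | hp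
      · subst hp; simp at ha
      · exact ih piece hp a ha
    · simp [hc] at hp
      have hne := List.splitOnP_ne_nil p rest
      cases hsp : rest.splitOnP p with
      | nil => exact absurd hsp hne
      | cons hd tl =>
        rw [hsp] at hp
        simp [List.modifyHead] at hp
        rcases hp with hp | hp
        · subst hp
          rcases List.mem_cons.mp ha with rfl | ha'
          · simpa using hc
          · exact ih hd (by rw [hsp]; exact List.mem_cons_self) a ha'
        · exact ih piece (by rw [hsp]; exact List.mem_cons_of_mem _ hp) a ha

theorem pvJoin_mem_iff (tcp : List String) (p : String) (k : Nat) (hk : 1 ≤ k) :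
    (PySem.Str.join "/" ((pvSplit p).take k) ∈ tcp)
      ↔ ∃ q ∈ tcp, pvSplit q = (pvSplit p).take k := by
  have hL : pvSplit p = (p.toList.splitOn '/').map String.ofList := pvSplit_eq p
  set L := p.toList.splitOn '/' with hLdef
  have htake : (pvSplit p).take k = (L.take k).map String.ofList := by
    rw [hL, List.map_take]
  have hfree : ∀ piece ∈ L.take k, '/' ∉ piece := by
    intro piece hmem hc
    have := pvSplitOnP_no_sep (· == '/') p.toList piece (List.mem_of_mem_take hmem) '/' hc
    simp at this
  have hne : L.take k ≠ [] := by
    have := List.splitOnP_ne_nil (· == '/') p.toList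
    have hlen : 1 ≤ L.length := List.length_pos_of_ne_nil this
    intro hcontra
    have h2 := congrArg List.length hcontra
    rw [List.length_take] at h2
    simp only [List.length_nil] at h2
    omega
  have hJlist : (PySem.Str.join "/" ((pvSplit p).take k)).toList = ['/'].intercalate (L.take k) := by
    rw [htake, PySem.Str.toList_join]
    simp [PySem.Chars.join, List.map_map, Function.comp_def, String.toList_ofList]
  constructor
  · intro hmem
    refine ⟨_, hmem, ?_⟩
    rw [pvSplit_eq, hJlist, List.splitOn_intercalate _ _ hfree hne, htake]
  · rintro ⟨q, hq, hsplit⟩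
    have hqsplit : q.toList.splitOn '/' = L.take k := by
      have := congrArg (List.map String.toList) (pvSplit_eq q ▸ hsplit)
      rw [htake] at this
      simpa [List.map_map, Function.comp_def, String.toList_ofList] using this
    have : q.toList = ['/'].intercalate (L.take k) := by
      rw [← hqsplit, List.intercalate_splitOn]
    have hq' : q = PySem.Str.join "/" ((pvSplit p).take k) :=
      String.toList_inj.mp (by rw [this, hJlist])
    rwa [← hq']

-- the semantic predicate both ports are reduced to
def pvCovers (items : List (String × List String)) (o : String) : Prop :=
  ∃ ps, (o, ps) ∈ items ∧ ∃ k : Nat, 1 ≤ k ∧ k < ps.length ∧ ∃ o', (o', ps.take k) ∈ items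

theorem pvMem_foldl_addFst (l : List (String × List String)) (s0 : PySem.Set String) (o : String) :
    o ∈ l.foldl (fun c y => PySem.Set.add c y.1) s0 ↔ o ∈ s0 ∨ ∃ y ∈ l, o = y.1 := by
  rw [← PySem.Set.update_map_eq_foldl_add, PySem.Set.mem_update]
  simp [eq_comm]

theorem pvMem_groupsFold (l : List (String × List (String × List String)))
    (ended : PySem.Set String) (fuel : Nat) (s0 : PySem.Set String) (o : String) :
    o ∈ l.foldl (fun cov hs =>
        if PySem.Set.contains ended hs.1 then
          hs.2.foldl (fun c y => PySem.Set.add c y.1) cov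
        else
          PySem.Set.union cov (fcrCovered fuel hs.2)) s0
      ↔ o ∈ s0 ∨ ∃ hs ∈ l,
          (PySem.Set.contains ended hs.1 = true ∧ ∃ y ∈ hs.2, o = y.1) ∨
          (PySem.Set.contains ended hs.1 = false ∧ o ∈ fcrCovered fuel hs.2) := by
  induction l generalizing s0 with
  | nil => simp
  | cons hs l ih =>
    simp only [List.foldl_cons]
    cases hcb : PySem.Set.contains ended hs.1 with
    | true =>
      rw [if_pos rfl]
      rw [ih, pvMem_foldl_addFst]
      constructor
      · rintro (⟨h | h⟩ | h)
        · exact Or.inl h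
        · exact Or.inr ⟨hs, List.mem_cons_self, Or.inl ⟨hcb, h⟩⟩
        · rcases h with ⟨hs', hmem, hb⟩; exact Or.inr ⟨hs', List.mem_cons_of_mem _ hmem, hb⟩
      · rintro (h | ⟨hs', hmem, hb⟩)
        · exact Or.inl (Or.inl h)
        · rcases List.mem_cons.mp hmem with rfl | hmem'
          · rcases hb with ⟨_, h2⟩ | ⟨hcb', _⟩
            · exact Or.inl (Or.inr h2)
            · rw [hcb] at hcb'; cases hcb'
          · exact Or.inr ⟨hs', hmem', hb⟩
    | false =>
      rw [if_neg (by simp)]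
      rw [ih]
      simp only [PySem.Set.mem_union]
      constructor
      · rintro (⟨h | h⟩ | h)
        · exact Or.inl h
        · exact Or.inr ⟨hs, List.mem_cons_self, Or.inr ⟨hcb, h⟩⟩
        · rcases h with ⟨hs', hmem, hb⟩; exact Or.inr ⟨hs', List.mem_cons_of_mem _ hmem, hb⟩
      · rintro (h | ⟨hs', hmem, hb⟩)
        · exact Or.inl (Or.inl h)
        · rcases List.mem_cons.mp hmem with rfl | hmem'
          · rcases hb with ⟨hcb', _⟩ | ⟨_, h2⟩
            · rw [hcb] at hcb'; cases hcb'
            · exact Or.inl (Or.inr h2)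
          · exact Or.inr ⟨hs', hmem', hb⟩

theorem fcrCovered_nil (fuel : Nat) : fcrCovered fuel [] = [] := by
  cases fuel with
  | zero => rfl
  | succ fuel => simp [fcrCovered]; rfl

-- drop-1 sum helper
theorem pvSum_drop (l : List (String × List String)) (h : ∀ x ∈ l, 1 < x.2.length) :
    ((l.map (fun x => (x.1, x.2.drop 1))).map (fun z => z.2.length)).sum + l.length
      = (l.map (fun x => x.2.length)).sum := by
  induction l with
  | nil => simp
  | cons x l ih =>
    have hx := h x List.mem_cons_self
    have := ih (fun y hy => h y (List.mem_cons_of_mem _ hy))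
    simp only [List.map_cons, List.sum_cons, List.length_cons]
    rw [List.length_drop]
    omega

theorem pvCovered_iff (fuel : Nat) (items : List (String × List String))
    (hgood : ∀ x ∈ items, x.2 ≠ [])
    (hfuel : (items.map (fun x => x.2.length)).sum < fuel) (o : String) :
    o ∈ fcrCovered fuel items ↔ pvCovers items o := by
  induction fuel generalizing items with
  | zero => omega
  | succ fuel ih =>
    simp only [fcrCovered]
    rw [pvMem_groupsFold]
    simp only [List.not_mem_nil, false_or]  -- o ∈ [] gone
    -- abbreviations
    set ended : PySem.Set String :=
      PySem.Set.ofList ((items.filter (fun x => x.2.length == 1)).map (fun x => x.2.headD "")) with hended_def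
    set grouped := (items.filter (fun x => 1 < x.2.length)).map
      (fun x => (x.2.headD "", (x.1, x.2.drop 1))) with hgrouped_def
    set groups : PySem.Dict String (List (String × List String)) :=
      grouped.foldl (fun d p => d.modify p.1 [] (fun v => v ++ [p.2])) PySem.Dict.empty with hgroups_def
    have hkeys : groups.keys = PySem.Set.ofList (grouped.map Prod.fst) := by
      rw [hgroups_def]
      rw [PySem.Dict.keys_foldl_modify_key grouped (fun p => p.1) [] (fun d p => (fun v => v ++ [p.2])) PySem.Dict.empty]
      rw [PySem.Dict.keys_empty, PySem.Set.update_nil_left]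
    have hnodup : groups.keys.Nodup := by rw [hkeys]; exact PySem.Set.nodup_ofList _
    have hitems : groups.items = groups.keys.map (fun h => (h, groups.getD h [])) :=
      PySem.Dict.items_eq_map_keys groups hnodup []
    have hgetD : ∀ h, groups.getD h []
        = ((items.filter (fun x => 1 < x.2.length && x.2.headD "" == h)).map (fun x => (x.1, x.2.drop 1))) := by
      intro h
      rw [hgroups_def, PySem.Dict.getD_foldl_modify_append, PySem.Dict.getD_empty]
      rw [hgrouped_def, List.filter_map, List.map_map, List.filter_filter]
      simp only [Function.comp_def, List.nil_append]
      congr 1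
      apply List.filter_congr
      intro a _
      rw [Bool.and_comm]
    -- ended membership
    have hlen1 : ∀ (l : List String) (h : String), l.length = 1 → (l.headD "" = h ↔ l = [h]) := by
      intro l h hl
      match l, hl with
      | [a], _ => simp [List.headD]
    have hmem_ended : ∀ h, PySem.Set.contains ended h = true ↔ ∃ x ∈ items, x.2 = [h] := by
      intro h
      rw [PySem.Set.contains_iff, hended_def, PySem.Set.mem_ofList]
      simp only [List.mem_map, List.mem_filter]
      constructor
      · rintro ⟨x, ⟨hx, hl⟩, hh⟩
        have hl' : x.2.length = 1 := by simpa using hl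
        exact ⟨x, hx, (hlen1 x.2 h hl').mp hh⟩
      · rintro ⟨x, hx, hxl⟩
        exact ⟨x, ⟨hx, by rw [hxl]; rfl⟩, by rw [hxl]; rfl⟩
    -- membership in a group's sub-items
    have hG : ∀ h z, z ∈ groups.getD h [] ↔
        ∃ x ∈ items, 1 < x.2.length ∧ x.2.headD "" = h ∧ z = (x.1, x.2.drop 1) := by
      intro h z
      rw [hgetD h]
      simp only [List.mem_map, List.mem_filter, Bool.and_eq_true, decide_eq_true_eq, beq_iff_eq]
      constructor
      · rintro ⟨x, ⟨hx, hlt, hh⟩, rfl⟩; exact ⟨x, hx, hlt, hh, rfl⟩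
      · rintro ⟨x, hx, hlt, hh, rfl⟩; exact ⟨x, ⟨hx, hlt, hh⟩, rfl⟩
    have hgoodG : ∀ h, ∀ z ∈ groups.getD h [], z.2 ≠ [] := by
      intro h z hz
      obtain ⟨x, _, hlt, _, rfl⟩ := (hG h z).mp hz
      intro hc
      have := congrArg List.length hc
      simp at this
      omega
    have hfuelG : ∀ h, groups.getD h [] ≠ [] →
        ((groups.getD h []).map (fun z => z.2.length)).sum < fuel := by
      intro h hne
      rw [hgetD h] at hne ⊢
      set F := items.filter (fun x => 1 < x.2.length && x.2.headD "" == h) with hF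
      have hFall : ∀ x ∈ F, 1 < x.2.length := by
        intro x hx
        have := (List.mem_filter.mp hx).2
        simp only [Bool.and_eq_true, decide_eq_true_eq] at this
        exact this.1
      have hsum := pvSum_drop F hFall
      have hsub : (F.map (fun x => x.2.length)).sum ≤ (items.map (fun x => x.2.length)).sum := by
        refine List.Sublist.sum_le_sum ?_ (by simp)
        exact List.Sublist.map _ List.filter_sublist
      have hFne : F ≠ [] := by
        intro hc; rw [hc] at hne; simp at hne
      have hFlen : 1 ≤ F.length := List.length_pos_of_ne_nil hFne
      omega
    have hkeys_mem : ∀ h, h ∈ groups.keys ↔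
        ∃ x ∈ items, 1 < x.2.length ∧ x.2.headD "" = h := by
      intro h
      rw [hkeys, PySem.Set.mem_ofList, hgrouped_def]
      simp only [List.map_map, List.mem_map, Function.comp_def, List.mem_filter,
        decide_eq_true_eq]
      constructor
      · rintro ⟨x, ⟨hx, hlt⟩, rfl⟩; exact ⟨x, hx, hlt, rfl⟩
      · rintro ⟨x, hx, hlt, rfl⟩; exact ⟨x, ⟨hx, hlt⟩, rfl⟩
    have hcons : ∀ (x : String × List String), x ∈ items → 1 < x.2.length →
        x.2 = x.2.headD "" :: x.2.drop 1 := by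
      intro x hx hlt
      cases hxl : x.2 with
      | nil => rw [hxl] at hlt; simp at hlt
      | cons a t => simp [List.headD]
    constructor
    · rintro ⟨hs, hhs, hbranch⟩
      rw [hitems] at hhs
      obtain ⟨h, hhk, rfl⟩ := List.mem_map.mp hhs
      rcases hbranch with ⟨hcb, y, hyG, rfl⟩ | ⟨hcb, hoC⟩
      · obtain ⟨x, hx, hlt, hxh, rfl⟩ := (hG h y).mp hyG
        obtain ⟨x0, hx0, hx0l⟩ := (hmem_ended h).mp hcb
        refine ⟨x.2, hx, 1, le_refl 1, hlt, x0.1, ?_⟩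
        have : x.2.take 1 = [h] := by
          rw [hcons x hx hlt, hxh]; rfl
        rw [this, ← hx0l]
        exact hx0
      · by_cases hGnil : groups.getD h [] = []
        · rw [hGnil, fcrCovered_nil] at hoC
          simp at hoC
        · have hcov := (ih _ (hgoodG h) (hfuelG h hGnil)).mp hoC
          obtain ⟨ts, htsG, k, hk1, hklt, o'', ho''G⟩ := hcov
          obtain ⟨x, hx, hlt, hxh, hxeq⟩ := (hG h (o, ts)).mp htsG
          have ho : o = x.1 := congrArg Prod.fst hxeq
          have hts : ts = x.2.drop 1 := congrArg Prod.snd hxeq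
          obtain ⟨x', hx', hlt', hxh', hxeq'⟩ := (hG h (o'', ts.take k)).mp ho''G
          have hx2 : x.2 = h :: ts := by rw [hcons x hx hlt, hxh, ← hts]
          have hx2' : x'.2 = h :: ts.take k := by
            rw [hcons x' hx' hlt', hxh']
            congr 1
            exact (congrArg Prod.snd hxeq').symm
          refine ⟨x.2, by rw [ho] at *; simpa using hx, k + 1, by omega, ?_, x'.1, ?_⟩
          · rw [hx2]; simp; omega
          · have : x.2.take (k + 1) = h :: ts.take k := by rw [hx2]; rfl
            rw [this, ← hx2']
            simpa using hx'
    · rintro ⟨ps, hops, k, hk1, hklt, o', ho'⟩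
      have hps_ne : ps ≠ [] := hgood (o, ps) hops
      cases ps with
      | nil => exact absurd rfl hps_ne
      | cons h t =>
        have ht_len : 1 ≤ t.length := by simp at hklt; omega
        have hlt : 1 < (h :: t).length := by simp; omega
        have hGmem : (o, t) ∈ groups.getD h [] :=
          (hG h (o, t)).mpr ⟨(o, h :: t), hops, hlt, rfl, rfl⟩
        have hhk : h ∈ groups.keys :=
          (hkeys_mem h).mpr ⟨(o, h :: t), hops, hlt, rfl⟩
        have hhs : (h, groups.getD h []) ∈ groups.items := by
          rw [hitems]; exact List.mem_map.mpr ⟨h, hhk, rfl⟩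
        refine ⟨(h, groups.getD h []), hhs, ?_⟩
        cases hcb : PySem.Set.contains ended h with
        | true => exact Or.inl ⟨rfl, (o, t), hGmem, rfl⟩
        | false =>
          refine Or.inr ⟨rfl, ?_⟩
          have hGne : groups.getD h [] ≠ [] := List.ne_nil_of_mem hGmem
          rw [ih _ (hgoodG h) (hfuelG h hGne)]
          rcases Nat.lt_or_ge k 2 with hk2 | hk2
          · -- k = 1: the prefix [h] is an ended path, contradicting hcb
            have hk : k = 1 := by omega
            rw [hk] at ho'
            have htake : (h :: t).take 1 = [h] := rfl
            rw [htake] at ho'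
            have : PySem.Set.contains ended h = true :=
              (hmem_ended h).mpr ⟨(o', [h]), ho', rfl⟩
            rw [hcb] at this; cases this
          · have htake : (h :: t).take k = h :: t.take (k - 1) := by
              cases k with
              | zero => omega
              | succ k' => simp [List.take]
            rw [htake] at ho'
            have hGmem' : (o', t.take (k - 1)) ∈ groups.getD h [] := by
              refine (hG h (o', t.take (k - 1))).mpr ⟨(o', h :: t.take (k - 1)), ho', ?_, rfl, rfl⟩
              simp [List.length_take]
              omega
            exact ⟨t, hGmem, k - 1, by omega, by simp at hklt ⊢; omega, o', hGmem'⟩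

theorem pvFoldl_addIf_congr (l : List String) (s0 : PySem.Set String) (f g : String → Bool)
    (h : ∀ x ∈ l, f x = g x) :
    l.foldl (fun s x => if f x then PySem.Set.add s x else s) s0
      = l.foldl (fun s x => if g x then PySem.Set.add s x else s) s0 := by
  induction l generalizing s0 with
  | nil => rfl
  | cons x l ih =>
    simp only [List.foldl_cons]
    rw [h x List.mem_cons_self]
    exact ih _ (fun y hy => h y (List.mem_cons_of_mem _ hy))

theorem pvSplit_ne_nil (s : String) : pvSplit s ≠ [] := by
  rw [pvSplit_eq]
  intro hc
  exact List.splitOnP_ne_nil _ _ (List.map_eq_nil_iff.mp hc)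

theorem pvAssemble (tcp : List String) :
    find_collision_roots_py tcp = find_collision_roots_py_alt tcp := by
  unfold find_collision_roots_py find_collision_roots_py_alt
  show _ = tcp.foldl _ []
  set items := tcp.map (fun p => (p, pvSplit p)) with hitems_def
  set covered := fcrCovered ((items.map (fun x => x.2.length)).sum + 1) items with hcov_def
  have hgood : ∀ x ∈ items, x.2 ≠ [] := by
    rintro x hx
    rw [hitems_def] at hx
    obtain ⟨p, _, rfl⟩ := List.mem_map.mp hx
    exact pvSplit_ne_nil p
  have hcovered : ∀ o, o ∈ covered ↔ pvCovers items o := by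
    intro o
    exact pvCovered_iff _ _ hgood (Nat.lt_succ_self _) o
  have hmem_items : ∀ (o : String) (ps : List String),
      (o, ps) ∈ items ↔ o ∈ tcp ∧ ps = pvSplit o := by
    intro o ps
    rw [hitems_def]
    simp only [List.mem_map, Prod.mk.injEq]
    constructor
    · rintro ⟨p, hp, rfl, rfl⟩; exact ⟨hp, rfl⟩
    · rintro ⟨hp, rfl⟩; exact ⟨o, hp, rfl, rfl⟩
  -- the pointwise condition equality
  have key : ∀ path ∈ tcp,
      ((PySem.List.pyRange 1 (PySem.List.len (pvSplit path))).all
        (fun i => !(PySem.Set.contains tcp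
          (PySem.Str.join "/" (PySem.List.slice (pvSplit path) none (some i))))))
      = !(PySem.Set.contains covered path) := by
    intro path hpath
    have hcov_iff : PySem.Set.contains covered path = true
        ↔ ∃ k : Nat, 1 ≤ k ∧ k < (pvSplit path).length ∧
            PySem.Str.join "/" ((pvSplit path).take k) ∈ tcp := by
      rw [PySem.Set.contains_iff, hcovered, pvCovers]
      constructor
      · rintro ⟨ps, hops, k, hk1, hklt, o', ho'⟩
        obtain ⟨-, rfl⟩ := (hmem_items _ _).mp hops
        obtain ⟨ho'mem, ho'split⟩ := (hmem_items _ _).mp ho'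
        exact ⟨k, hk1, hklt, (pvJoin_mem_iff tcp path k hk1).mpr ⟨o', ho'mem, ho'split.symm⟩⟩
      · rintro ⟨k, hk1, hklt, hjoin⟩
        obtain ⟨q, hq, hqsplit⟩ := (pvJoin_mem_iff tcp path k hk1).mp hjoin
        exact ⟨pvSplit path, (hmem_items _ _).mpr ⟨hpath, rfl⟩, k, hk1, hklt,
          q, (hmem_items _ _).mpr ⟨hq, hqsplit.symm⟩⟩
    have hall_iff : ((PySem.List.pyRange 1 (PySem.List.len (pvSplit path))).all
        (fun i => !(PySem.Set.contains tcp
          (PySem.Str.join "/" (PySem.List.slice (pvSplit path) none (some i)))))) = true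
        ↔ ¬ ∃ k : Nat, 1 ≤ k ∧ k < (pvSplit path).length ∧
            PySem.Str.join "/" ((pvSplit path).take k) ∈ tcp := by
      rw [List.all_eq_true]
      constructor
      · rintro hall ⟨k, hk1, hklt, hjoin⟩
        have hk : (k : Int) ∈ PySem.List.pyRange 1 (PySem.List.len (pvSplit path)) := by
          rw [PySem.List.mem_pyRange_one, PySem.List.len_eq]
          constructor <;> [exact_mod_cast hk1; exact_mod_cast hklt]
        have := hall _ hk
        rw [PySem.List.slice_to _ (by positivity)] at this
        simp only [Int.toNat_natCast] at this
        rw [Bool.not_eq_eq_eq_not, Bool.not_true, ← Bool.not_eq_true,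
          PySem.Set.contains_iff] at this
        exact this hjoin
      · intro hno i hi
        rw [PySem.List.mem_pyRange_one, PySem.List.len_eq] at hi
        obtain ⟨hi1, hilt⟩ := hi
        rw [PySem.List.slice_to _ (by omega)]
        rw [Bool.not_eq_eq_eq_not, Bool.not_true, ← Bool.not_eq_true, PySem.Set.contains_iff]
        intro hjoin
        exact hno ⟨i.toNat, by omega, by omega, hjoin⟩
    cases hcb : PySem.Set.contains covered path with
    | true =>
      obtain h := hcov_iff.mp hcb
      simp only [Bool.not_true]
      rw [Bool.eq_false_iff]
      intro hc
      exact (hall_iff.mp hc) h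
    | false =>
      simp only [Bool.not_false]
      exact hall_iff.mpr (fun hex => by rw [hcov_iff.mpr hex] at hcb; cases hcb)
  have hswap : (fun (s : PySem.Set String) p =>
      if PySem.Set.contains covered p then s else PySem.Set.add s p)
      = (fun (s : PySem.Set String) p =>
      if !(PySem.Set.contains covered p) then PySem.Set.add s p else s) := by
    funext s p; cases PySem.Set.contains covered p <;> simp
  rw [hswap]
  exact pvFoldl_addIf_congr tcp [] _ _ key

-- ===== VERDICT (by name: the statement is the Claim_ definition above) =====
theorem find_collision_roots_py_spec : Claim_equal_find_collision_roots_py := by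
  intro tcp _
  exact pvAssemble tcp
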